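-- pv_equiv track=rewrite | github.com/Viny2030/monitor_legistativo | scrapers/sil.py | _ckan_buscar_campos_fecha
-- ===== SOURCE A (Python) =====
-- from typing import Optional
--
-- def _ckan_buscar_campos_fecha(campos: list[str]) -> tuple[Optional[str], Optional[str]]:
--     """
--     Identifica los campos de fecha_ingreso y fecha_dictamen entre los campos disponibles.
--     Retorna (campo_ingreso, campo_dictamen) o (None, None).
--     """
--     campo_ingreso = None
--     campo_dictamen = None
--
--     patrones_ingreso = ["ingreso", "presentacion", "fecha_in", "fecha_p"]
--     patrones_dictamen = ["dictamen", "despacho", "comision", "comisión", "fecha_d", "orden"]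
--
--     for c in campos:
--         cl = c.lower()
--         if not campo_ingreso and any(p in cl for p in patrones_ingreso):
--             campo_ingreso = c
--         if not campo_dictamen and any(p in cl for p in patrones_dictamen):
--             campo_dictamen = c
--
--     return campo_ingreso, campo_dictamen
-- ===== SOURCE B (Python) =====
-- from typing import Optional
--
-- def _ckan_buscar_campos_fecha(campos: list[str]) -> tuple[Optional[str], Optional[str]]:
--     patrones_ingreso = ["ingreso", "presentacion", "fecha_in", "fecha_p"]
--     patrones_dictamen = ["dictamen", "despacho", "comision", "comisi\u00f3n", "fecha_d", "orden"]
--     # Back-to-front scan with override: an earlier element overwrites a later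
--     # candidate, so after the whole pass each slot holds the FIRST match.
--     campo_ingreso: Optional[str] = None
--     campo_dictamen: Optional[str] = None
--     for c in reversed(campos):
--         cl = c.lower()
--         if any(p in cl for p in patrones_ingreso):
--             campo_ingreso = c
--         if any(p in cl for p in patrones_dictamen):
--             campo_dictamen = c
--     return campo_ingreso, campo_dictamen
-- ===== Notes on version B (the rewrite author's own statement) =====
-- stated objective: alternative
-- what changed: Replaces the forward scan with truthiness-guarded first-match accumulators by a guard-free back-to-front scan with an override accumulator: iterating reversed(campos), every match simply overwrites the slot, so the first match per group survives.
import Mathlib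
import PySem

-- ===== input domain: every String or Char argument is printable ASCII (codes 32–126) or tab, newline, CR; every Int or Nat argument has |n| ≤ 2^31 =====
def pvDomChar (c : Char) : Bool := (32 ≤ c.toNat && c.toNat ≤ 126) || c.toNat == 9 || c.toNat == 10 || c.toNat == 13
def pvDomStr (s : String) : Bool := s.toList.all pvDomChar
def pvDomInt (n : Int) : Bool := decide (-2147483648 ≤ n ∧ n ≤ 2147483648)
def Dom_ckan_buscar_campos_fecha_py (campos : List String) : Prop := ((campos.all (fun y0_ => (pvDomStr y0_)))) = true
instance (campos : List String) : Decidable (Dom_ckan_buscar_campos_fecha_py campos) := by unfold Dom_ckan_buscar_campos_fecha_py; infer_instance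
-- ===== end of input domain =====

-- B replaces A's guarded forward first-match scan by a guard-free back-to-front
-- override scan (alternative decomposition; same cost).

-- ===== PORT A =====
def pvPatIngreso : List String := ["ingreso", "presentacion", "fecha_in", "fecha_p"]
def pvPatDictamen : List String := ["dictamen", "despacho", "comision", "comisión", "fecha_d", "orden"]

-- Python truthiness of an Optional[str]: `not x` is true iff x is None or the empty string (exact).
def pvFalsyOptStr (o : Option String) : Bool :=
  match o with
  | none => true
  | some s => s == ""

def pvStepA (acc : Option String × Option String) (c : String) : Option String × Option String :=
  let cl := PySem.Str.lower c
  let i := if pvFalsyOptStr acc.1 && pvPatIngreso.any (fun p => PySem.Str.isIn p cl) then some c else acc.1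
  let d := if pvFalsyOptStr acc.2 && pvPatDictamen.any (fun p => PySem.Str.isIn p cl) then some c else acc.2
  (i, d)

def ckan_buscar_campos_fecha_py (campos : List String) : Option String × Option String :=
  campos.foldl pvStepA (none, none)

-- ===== PORT B =====
def pvMatchIngreso (c : String) : Bool :=
  pvPatIngreso.any (fun p => PySem.Str.isIn p (PySem.Str.lower c))

def pvMatchDictamen (c : String) : Bool :=
  pvPatDictamen.any (fun p => PySem.Str.isIn p (PySem.Str.lower c))

-- loop body of B: every match overwrites the slot (no guards)
def pvStepB (acc : Option String × Option String) (c : String) : Option String × Option String :=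
  ((if pvMatchIngreso c then some c else acc.1),
   (if pvMatchDictamen c then some c else acc.2))

-- `for c in reversed(campos): …` = fold over campos.reverse
def ckan_buscar_campos_fecha_py_alt (campos : List String) : Option String × Option String :=
  campos.reverse.foldl pvStepB (none, none)

-- ===== PRECONDITION & SPEC =====
def Spec_ckan_buscar_campos_fecha_py (campos : List String) (out : Option String × Option String) : Prop := out = ckan_buscar_campos_fecha_py_alt campos
instance (campos : List String) (out : Option String × Option String) : Decidable (Spec_ckan_buscar_campos_fecha_py campos out) := by unfold Spec_ckan_buscar_campos_fecha_py; infer_instance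

-- ===== CLAIM (what is proved, stated in full; the proofs are below) =====
def Claim_equal_ckan_buscar_campos_fecha_py : Prop := ∀ (campos : List String), Dom_ckan_buscar_campos_fecha_py campos → Spec_ckan_buscar_campos_fecha_py campos (ckan_buscar_campos_fecha_py campos)

-- ===== LEMMAS AND PROOFS =====

-- A string matching a pattern group is nonempty (every pattern is a nonempty literal),
-- so Python's truthiness guard `not campo_…` is equivalent to `campo_… is None`.
lemma pvMatchIngreso_ne_empty {s : String} (h : pvMatchIngreso s = true) : (s == "") = false := by
  by_cases hs : s = ""
  · subst hs; revert h; decide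
  · simpa using hs

lemma pvMatchDictamen_ne_empty {s : String} (h : pvMatchDictamen s = true) : (s == "") = false := by
  by_cases hs : s = ""
  · subst hs; revert h; decide
  · simpa using hs

-- A's forward guarded fold computes the first match of each group.
lemma pvFoldA_eq (campos : List String) :
    ∀ (i d : Option String),
      (∀ s, i = some s → pvMatchIngreso s = true) →
      (∀ s, d = some s → pvMatchDictamen s = true) →
      campos.foldl pvStepA (i, d) =
        ((match i with | none => campos.find? pvMatchIngreso | some s => some s),
         (match d with | none => campos.find? pvMatchDictamen | some s => some s)) := by
  induction campos with
  | nil =>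
    intro i d _ _
    cases i <;> cases d <;> rfl
  | cons c cs ih =>
    intro i d hi hd
    rw [List.foldl_cons]
    cases i with
    | none =>
      cases d with
      | none =>
        have hstep : pvStepA (none, none) c =
            ((if pvMatchIngreso c then some c else none),
             (if pvMatchDictamen c then some c else none)) := by
          simp [pvStepA, pvFalsyOptStr, pvMatchIngreso, pvMatchDictamen]
        rw [hstep]
        by_cases hmi : pvMatchIngreso c = true
        · by_cases hmd : pvMatchDictamen c = true
          · rw [if_pos hmi, if_pos hmd,
              ih (some c) (some c) (by intro s hs; cases hs; exact hmi)
                (by intro s hs; cases hs; exact hmd)]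
            simp [hmi, hmd]
          · rw [if_pos hmi, if_neg hmd,
              ih (some c) none (by intro s hs; cases hs; exact hmi) (by intro s hs; cases hs)]
            simp [hmi, hmd]
        · by_cases hmd : pvMatchDictamen c = true
          · rw [if_neg hmi, if_pos hmd,
              ih none (some c) (by intro s hs; cases hs) (by intro s hs; cases hs; exact hmd)]
            simp [hmi, hmd]
          · rw [if_neg hmi, if_neg hmd,
              ih none none (by intro s hs; cases hs) (by intro s hs; cases hs)]
            simp [hmi, hmd]
      | some sd =>
        have hne := pvMatchDictamen_ne_empty (hd sd rfl)
        have hstep : pvStepA (none, some sd) c =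
            ((if pvMatchIngreso c then some c else none), some sd) := by
          simp [pvStepA, pvFalsyOptStr, pvMatchIngreso, hne]
        rw [hstep]
        by_cases hmi : pvMatchIngreso c = true
        · rw [if_pos hmi,
            ih (some c) (some sd) (by intro s hs; cases hs; exact hmi) hd]
          simp [hmi]
        · rw [if_neg hmi, ih none (some sd) (by intro s hs; cases hs) hd]
          simp [hmi]
    | some si =>
      have hne := pvMatchIngreso_ne_empty (hi si rfl)
      cases d with
      | none =>
        have hstep : pvStepA (some si, none) c =
            (some si, (if pvMatchDictamen c then some c else none)) := by
          simp [pvStepA, pvFalsyOptStr, pvMatchDictamen, hne]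
        rw [hstep]
        by_cases hmd : pvMatchDictamen c = true
        · rw [if_pos hmd,
            ih (some si) (some c) hi (by intro s hs; cases hs; exact hmd)]
          simp [hmd]
        · rw [if_neg hmd, ih (some si) none hi (by intro s hs; cases hs)]
          simp [hmd]
      | some sd =>
        have hne2 := pvMatchDictamen_ne_empty (hd sd rfl)
        have hstep : pvStepA (some si, some sd) c = (some si, some sd) := by
          simp [pvStepA, pvFalsyOptStr, hne, hne2]
        rw [hstep, ih _ _ hi hd]

-- B's reversed override fold also computes the first match of each group:
-- the last write in reverse order is the first match in forward order.
lemma pvFoldB_eq (campos : List String) :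
    campos.reverse.foldl pvStepB (none, none) =
      (campos.find? pvMatchIngreso, campos.find? pvMatchDictamen) := by
  induction campos with
  | nil => rfl
  | cons c cs ih =>
    rw [List.reverse_cons, List.foldl_append, ih]
    simp only [List.foldl_cons, List.foldl_nil, pvStepB, List.find?_cons]
    by_cases hmi : pvMatchIngreso c = true <;> by_cases hmd : pvMatchDictamen c = true <;>
      simp [hmi, hmd]

-- ===== VERDICT (by name: the statement is the Claim_ definition above) =====
theorem ckan_buscar_campos_fecha_py_spec : Claim_equal_ckan_buscar_campos_fecha_py := by
  intro campos _
  show ckan_buscar_campos_fecha_py campos = ckan_buscar_campos_fecha_py_alt campos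
  unfold ckan_buscar_campos_fecha_py ckan_buscar_campos_fecha_py_alt
  rw [pvFoldB_eq,
    pvFoldA_eq campos none none (by intro s h; cases h) (by intro s h; cases h)]
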